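-- pv_equiv track=rewrite | github.com/juy4556/PythonAlgorithm | 잡동/ao/4.py | comb_cards
-- ===== SOURCE A (Python) =====
-- def comb_cards(goal, length, num):
--     ended = False
--     if length >= 2:
--         for i in range(length - 1):
--             for j in range(i + 1, length):
--                 if num[i] + num[j] == goal:
--                     num.pop(j)
--                     num.pop(i)
--                     ended = True
--                     return ended
--
--     return ended
-- ===== SOURCE B (Python) =====
-- def comb_cards(goal, length, num):
--     # One-pass hash-set scan over the first `length` cards (does not mutate num;
--     # equivalence with A is about the return value only).
--     if length < 2:
--         return False
--     seen = set()
--     for x in num[:length]: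
--         if goal - x in seen:
--             return True
--         seen.add(x)
--     return False
-- ===== Notes on version B (the rewrite author's own statement) =====
-- stated objective: faster
-- what changed: Replaced the nested index loops over all pairs by a single pass over the first `length` cards with a hash set of values seen so far, testing the complement goal-x; B does not mutate num (A pops the matched pair), so equivalence is about the return value.
-- outside the precondition, e.g. on comb_cards(3, 5, [1, 2]): A returns True, B returns True
import Mathlib
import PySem

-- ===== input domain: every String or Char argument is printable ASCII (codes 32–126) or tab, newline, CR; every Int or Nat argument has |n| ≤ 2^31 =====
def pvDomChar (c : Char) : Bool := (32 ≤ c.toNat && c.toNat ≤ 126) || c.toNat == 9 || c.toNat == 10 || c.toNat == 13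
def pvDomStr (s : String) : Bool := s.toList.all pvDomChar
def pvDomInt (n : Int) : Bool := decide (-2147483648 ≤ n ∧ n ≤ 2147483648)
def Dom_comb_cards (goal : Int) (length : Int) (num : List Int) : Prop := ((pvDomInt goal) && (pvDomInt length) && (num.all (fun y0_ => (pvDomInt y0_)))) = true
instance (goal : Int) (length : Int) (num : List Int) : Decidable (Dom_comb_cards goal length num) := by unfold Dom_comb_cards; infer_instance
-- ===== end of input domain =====

-- B replaces A's nested all-pairs loops by a single hash-set complement scan over the
-- first `length` cards (asymptotically faster); A pops the matched pair from num, B does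
-- not mutate num, so the equivalence proved here is about the return value only.


-- ===== PORT A =====
-- nested `for i in range(length-1): for j in range(i+1, length)` with early return on the
-- first pair summing to goal; `num[i]` is in range under Pre_, so pyGetD is exact there.
def comb_cards (goal : Int) (length : Int) (num : List Int) : Bool :=
  if length ≥ 2 then
    (PySem.List.pyRange 0 (length - 1) 1).any (fun i =>
      (PySem.List.pyRange (i + 1) length 1).any (fun j =>
        PySem.List.pyGetD num i 0 + PySem.List.pyGetD num j 0 == goal))
  else false

-- ===== PORT B =====
-- the `for x in num[:length]` loop of Source B with its `seen` set accumulator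
def combScan (goal : Int) : List Int → PySem.Set Int → Bool
  | [], _ => false
  | x :: xs, seen =>
      if (goal - x) ∈ seen then true else combScan goal xs (PySem.Set.add seen x)

def comb_cards_alt (goal : Int) (length : Int) (num : List Int) : Bool :=
  if length < 2 then false
  else combScan goal (PySem.List.slice num none (some length)) PySem.Set.empty

-- ===== PRECONDITION & SPEC =====
-- Pre_ excludes inputs with 2 ≤ length > len(num): there A raises IndexError unless num[0]
-- pairs with an earlier-scanned element, in which case both programs still return True.
def Pre_comb_cards (goal : Int) (length : Int) (num : List Int) : Prop :=
  2 ≤ length → length ≤ num.length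
instance (goal : Int) (length : Int) (num : List Int) : Decidable (Pre_comb_cards goal length num) := by unfold Pre_comb_cards; infer_instance
def pvWitness_comb_cards : Int × Int × List Int := (5, 3, [1, 2, 4])

def Spec_comb_cards (goal : Int) (length : Int) (num : List Int) (out : Bool) : Prop := out = comb_cards_alt goal length num
instance (goal : Int) (length : Int) (num : List Int) (out : Bool) : Decidable (Spec_comb_cards goal length num out) := by unfold Spec_comb_cards; infer_instance

-- ===== CLAIM (what is proved, stated in full; the proofs are below) =====
def Claim_equal_comb_cards : Prop := ∀ (goal : Int) (length : Int) (num : List Int), Dom_comb_cards goal length num → Pre_comb_cards goal length num → Spec_comb_cards goal length num (comb_cards goal length num)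

-- ===== LEMMAS AND PROOFS =====

-- indexing a take-prefix agrees with indexing the original list
theorem getD_take_eq (num : List Int) (L i : Nat) (hi : i < L) (hL : L ≤ num.length) :
    (num.take L).getD i 0 = num.getD i 0 := by
  rw [List.getD_eq_getElem _ _ (by simp [Nat.min_eq_left hL]; omega),
    List.getD_eq_getElem _ _ (by omega), List.getElem_take]

-- the seen-set scan finds a pair iff some element's complement is in `seen`, or two
-- elements of the list itself sum to goal
theorem combScan_iff (goal : Int) (xs : List Int) (seen : PySem.Set Int) :
    combScan goal xs seen = true ↔
      (∃ x ∈ xs, (goal - x) ∈ seen) ∨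
      (∃ i j : Nat, i < j ∧ j < xs.length ∧ xs.getD i 0 + xs.getD j 0 = goal) := by
  induction xs generalizing seen with
  | nil => simp [combScan]
  | cons x t ih =>
    simp only [combScan]
    split_ifs with h
    · simp only [true_iff]
      exact Or.inl ⟨x, List.mem_cons_self .., h⟩
    · rw [ih]
      constructor
      · rintro (⟨y, hy, hmem⟩ | ⟨i, j, hij, hj, hsum⟩)
        · rw [PySem.Set.mem_add] at hmem
          rcases hmem with hmem | hmem
          · exact Or.inl ⟨y, List.mem_cons_of_mem _ hy, hmem⟩
          · -- goal - y = x, y ∈ t : pair (0, idx of y)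
            obtain ⟨j, hjlt, hget⟩ := List.mem_iff_getElem.mp hy
            refine Or.inr ⟨0, j + 1, by omega, by simpa using hjlt, ?_⟩
            have hty : t.getD j 0 = y := by rw [List.getD_eq_getElem _ _ hjlt, hget]
            simp only [List.getD_cons_zero, List.getD_cons_succ, hty]
            omega
        · exact Or.inr ⟨i + 1, j + 1, by omega, by simpa using hj, by simpa using hsum⟩
      · rintro (⟨y, hy, hmem⟩ | ⟨i, j, hij, hj, hsum⟩)
        · rcases List.mem_cons.mp hy with rfl | hy
          · exact absurd hmem h
          · exact Or.inl ⟨y, hy, by rw [PySem.Set.mem_add]; exact Or.inl hmem⟩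
        · cases i with
          | zero =>
            cases j with
            | zero => omega
            | succ j =>
              have hj' : j < t.length := by simpa using hj
              simp only [List.getD_cons_zero, List.getD_cons_succ] at hsum
              refine Or.inl ⟨t.getD j 0, ?_, ?_⟩
              · rw [List.getD_eq_getElem _ _ hj']; exact List.getElem_mem _
              · rw [PySem.Set.mem_add]; right; omega
          | succ i =>
            cases j with
            | zero => omega
            | succ j => exact Or.inr ⟨i, j, by omega, by simpa using hj, by simpa using hsum⟩

-- A's nested range scan finds a pair iff two positions below `length` sum to goal
theorem portA_iff (goal : Int) (length : Int) (num : List Int) (h2 : 2 ≤ length) :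
    comb_cards goal length num = true ↔
      (∃ i j : Nat, i < j ∧ (j : Int) < length ∧ num.getD i 0 + num.getD j 0 = goal) := by
  simp only [comb_cards, if_pos (by omega : length ≥ 2), List.any_eq_true,
    PySem.List.mem_pyRange_one, beq_iff_eq]
  constructor
  · rintro ⟨i, ⟨hi0, hi1⟩, j, ⟨hj0, hj1⟩, hsum⟩
    refine ⟨i.toNat, j.toNat, by omega, by omega, ?_⟩
    rw [show i = ((i.toNat : Nat) : Int) by omega, show j = ((j.toNat : Nat) : Int) by omega,
      PySem.List.pyGetD_natCast, PySem.List.pyGetD_natCast] at hsum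
    exact hsum
  · rintro ⟨i, j, hij, hj, hsum⟩
    refine ⟨(i : Int), ⟨by omega, by omega⟩, (j : Int), ⟨by omega, by omega⟩, ?_⟩
    rw [PySem.List.pyGetD_natCast, PySem.List.pyGetD_natCast]
    exact hsum

-- ===== VERDICT (by name: the statement is the Claim_ definition above) =====
theorem comb_cards_spec : Claim_equal_comb_cards := by
  intro goal length num _ hpre
  unfold Spec_comb_cards comb_cards_alt
  unfold Pre_comb_cards at hpre
  by_cases h2 : 2 ≤ length
  · rw [if_neg (by omega : ¬ length < 2)]
    have hlen : length ≤ (num.length : Int) := hpre h2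
    have hL : length.toNat ≤ num.length := by omega
    rw [PySem.List.slice_to num (show (0:Int) ≤ length by omega)]
    have hA := portA_iff goal length num h2
    have hB := combScan_iff goal (num.take length.toNat) PySem.Set.empty
    simp only [PySem.Set.empty, List.not_mem_nil, exists_false, and_false, false_or,
      List.length_take, Nat.min_eq_left hL] at hB
    rw [Bool.eq_iff_iff, hA, show (PySem.Set.empty : PySem.Set Int) = [] from rfl, hB]
    clear hA hB hpre
    constructor
    · rintro ⟨i, j, hij, hj, hsum⟩
      have hjL : j < length.toNat := by omega
      refine ⟨i, j, hij, hjL, ?_⟩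
      rw [getD_take_eq num _ i (by omega) hL, getD_take_eq num _ j hjL hL]
      exact hsum
    · rintro ⟨i, j, hij, hj, hsum⟩
      refine ⟨i, j, hij, by omega, ?_⟩
      rw [getD_take_eq num _ i (by omega) hL, getD_take_eq num _ j hj hL] at hsum
      exact hsum
  · rw [if_pos (by omega : length < 2)]
    unfold comb_cards
    rw [if_neg (by omega : ¬ length ≥ 2)]
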